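-- pv_equiv track=rewrite | github.com/dim273/t-pet | res/JudgeData/P53/gen.py | min_buy_for_eat_math
-- ===== SOURCE A (Python) =====
-- def min_buy_for_eat_math(n):
--     """
--     使用数学公式直接计算：x + (x-1)//2 >= n
--     解这个不等式，因为 (x-1)//2 是整数除法，需要分情况
--     实际上可以二分，但这里用数学方法更快
--     """
--     # 二分查找最小 x
--     left, right = 1, n
--     while left < right:
--         mid = (left + right) // 2
--         # 数学公式：f(x) = x + (x-1)//2
--         total = mid + (mid - 1) // 2
--         if total >= n:
--             right = mid
--         else:
--             left = mid + 1
--     return left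
-- ===== SOURCE B (Python) =====
-- def min_buy_for_eat_math(n):
--     # closed form: min x with x + (x-1)//2 >= n is ceil((2n+1)/3), clamped to >= 1
--     return max(1, (2 * n + 3) // 3)
-- ===== Notes on version B (the rewrite author's own statement) =====
-- stated objective: faster
-- what changed: Replaced the binary search over the interval by a single closed-form ceiling expression obtained by inverting the monotone cost function, clamped to at least one.
import Mathlib
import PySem

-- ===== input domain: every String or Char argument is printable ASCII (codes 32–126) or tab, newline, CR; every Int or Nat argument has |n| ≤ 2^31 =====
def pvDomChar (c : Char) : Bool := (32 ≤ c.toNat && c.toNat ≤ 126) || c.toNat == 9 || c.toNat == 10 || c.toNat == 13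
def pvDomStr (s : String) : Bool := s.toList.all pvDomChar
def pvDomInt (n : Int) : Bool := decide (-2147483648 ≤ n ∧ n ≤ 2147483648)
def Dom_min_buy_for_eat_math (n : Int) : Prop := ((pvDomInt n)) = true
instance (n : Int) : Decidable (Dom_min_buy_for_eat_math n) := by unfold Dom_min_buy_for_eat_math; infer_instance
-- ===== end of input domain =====

-- B replaces A's binary search by a closed-form ceiling expression (O(1) vs O(log n)).

-- ===== PORT A =====
-- the while loop of A, recursing on the shrinking interval [left, right]
def buyLoop (n left right : Int) : Int :=
  if h : left < right then
    let mid := PySem.Int.floordiv (left + right) 2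
    let total := mid + PySem.Int.floordiv (mid - 1) 2
    if n ≤ total then buyLoop n left mid else buyLoop n (mid + 1) right
  else left
termination_by (right - left).toNat
decreasing_by
  · have h2 : PySem.Int.floordiv (left + right) 2 < right :=
      (PySem.Int.floordiv_lt_iff_lt_mul (by omega)).mpr (by omega)
    omega
  · have h2 : left ≤ PySem.Int.floordiv (left + right) 2 :=
      (PySem.Int.le_floordiv_iff_mul_le (by omega)).mpr (by omega)
    omega

def min_buy_for_eat_math (n : Int) : Int := buyLoop n 1 n

-- ===== PORT B =====
def min_buy_for_eat_math_alt (n : Int) : Int :=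
  max 1 (PySem.Int.floordiv (2 * n + 3) 3)

-- ===== PRECONDITION & SPEC =====
def Spec_min_buy_for_eat_math (n : Int) (out : Int) : Prop := out = min_buy_for_eat_math_alt n
instance (n : Int) (out : Int) : Decidable (Spec_min_buy_for_eat_math n out) := by unfold Spec_min_buy_for_eat_math; infer_instance

-- ===== CLAIM (what is proved, stated in full; the proofs are below) =====
def Claim_equal_min_buy_for_eat_math : Prop := ∀ (n : Int), Dom_min_buy_for_eat_math n → Spec_min_buy_for_eat_math n (min_buy_for_eat_math n)

-- ===== LEMMAS AND PROOFS =====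

-- the binary search returns t whenever t is the threshold of the monotone predicate and lies in [left, right]
lemma buyLoop_eq (n t : Int)
    (hiff : ∀ x : Int, n ≤ x + PySem.Int.floordiv (x - 1) 2 ↔ t ≤ x) :
    ∀ (k : Nat) (left right : Int), (right - left).toNat = k → left ≤ t → t ≤ right →
      buyLoop n left right = t := by
  intro k
  induction k using Nat.strong_induction_on with
  | _ k ih =>
    intro left right hk h1 h2
    rw [buyLoop]
    simp only []
    split_ifs with hlt htot
    · -- n ≤ total : go left with right := mid
      have hmlt : PySem.Int.floordiv (left + right) 2 < right :=
        (PySem.Int.floordiv_lt_iff_lt_mul (by omega)).mpr (by omega)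
      have htm : t ≤ PySem.Int.floordiv (left + right) 2 := (hiff _).mp htot
      exact ih _ (by omega) left _ rfl h1 htm
    · -- total < n : go right with left := mid + 1
      have hmge : left ≤ PySem.Int.floordiv (left + right) 2 :=
        (PySem.Int.le_floordiv_iff_mul_le (by omega)).mpr (by omega)
      have htm : ¬ t ≤ PySem.Int.floordiv (left + right) 2 := fun hc => htot ((hiff _).mpr hc)
      exact ih _ (by omega) _ right rfl (by omega) h2
    · omega

-- ===== VERDICT (by name: the statement is the Claim_ definition above) =====
theorem min_buy_for_eat_math_spec : Claim_equal_min_buy_for_eat_math := by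
  intro n _
  unfold Spec_min_buy_for_eat_math min_buy_for_eat_math min_buy_for_eat_math_alt
  have hq := (PySem.Int.floordiv_eq_iff_of_pos (a := 2 * n + 3) (b := 3)
      (q := PySem.Int.floordiv (2 * n + 3) 3) (by omega)).mp rfl
  by_cases hn : n ≤ 1
  · rw [buyLoop, dif_neg (by omega)]
    omega
  · -- n ≥ 2 : the threshold is q = (2n+3)//3 ≥ 2
    set q := PySem.Int.floordiv (2 * n + 3) 3 with hqdef
    have hiff : ∀ x : Int, n ≤ x + PySem.Int.floordiv (x - 1) 2 ↔ q ≤ x := by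
      intro x
      have hd := PySem.Int.floordiv_mul_add_mod (x - 1) 2
      have hm0 := PySem.Int.mod_nonneg (x - 1) (b := 2) (by omega)
      have hm2 := PySem.Int.mod_lt (x - 1) (b := 2) (by omega)
      omega
    rw [buyLoop_eq n q hiff (n - 1).toNat 1 n (by omega) (by omega) (by omega)]
    omega
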